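-- pv_equiv track=rewrite | github.com/jjaspe/python | Problem_502_Counting_Castles.py | getNextArrayOfOddCastlesPerHeight
-- ===== SOURCE A (Python) =====
-- def getNextArrayOfOddCastlesPerHeight(totalHeight, previousArrayOfEvenCastles, previousArrayOfOddCastles):
--     oddCastlesByHeight=[]
--     oddStart=0
--     for index in range(totalHeight+1):
--         if index%2==0:
--             oddStart=1
--         else:
--             oddStart=0
--         # the (eventStart-1)^2 is to turn eventStart from 0 to 1 and from 1 to 0
--         partialEvenSumAlternating=[previousArrayOfEvenCastles[x] for x in range(oddStart,index-1+1,2)]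
--         partialOddSumAlternating=[previousArrayOfOddCastles[x] for x in range((oddStart-1)**2,index-2+1,2)]
--         oddCastlesByHeight.append(sum(partialEvenSumAlternating)+\
--                                        sum(previousArrayOfOddCastles[index:])+\
--                                        sum(partialOddSumAlternating))
--     return oddCastlesByHeight
-- ===== SOURCE B (Python) =====
-- def getNextArrayOfOddCastlesPerHeight(totalHeight, previousArrayOfEvenCastles, previousArrayOfOddCastles):
--     # One pass with running parity-split prefix sums and a running suffix sum
--     # instead of recomputing strided slices for every index.
--     result = []
--     suffix = sum(previousArrayOfOddCastles)
--     evenPrefix = [0, 0]  # sums of previousArrayOfEvenCastles[x] for x seen so far, split by x % 2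
--     oddPrefix = [0, 0]   # same for previousArrayOfOddCastles
--     for i in range(totalHeight + 1):
--         result.append(evenPrefix[1 - i % 2] + oddPrefix[i % 2] + suffix)
--         if i < len(previousArrayOfEvenCastles):
--             evenPrefix[i % 2] += previousArrayOfEvenCastles[i]
--         if i < len(previousArrayOfOddCastles):
--             oddPrefix[i % 2] += previousArrayOfOddCastles[i]
--             suffix -= previousArrayOfOddCastles[i]
--     return result
-- ===== Notes on version B (the rewrite author's own statement) =====
-- stated objective: faster
-- what changed: Replaces A's per-index strided list comprehensions and suffix slice sums (recomputed from scratch for every index) by a single pass maintaining running parity-split prefix sums and a running suffix sum.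
import Mathlib
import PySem

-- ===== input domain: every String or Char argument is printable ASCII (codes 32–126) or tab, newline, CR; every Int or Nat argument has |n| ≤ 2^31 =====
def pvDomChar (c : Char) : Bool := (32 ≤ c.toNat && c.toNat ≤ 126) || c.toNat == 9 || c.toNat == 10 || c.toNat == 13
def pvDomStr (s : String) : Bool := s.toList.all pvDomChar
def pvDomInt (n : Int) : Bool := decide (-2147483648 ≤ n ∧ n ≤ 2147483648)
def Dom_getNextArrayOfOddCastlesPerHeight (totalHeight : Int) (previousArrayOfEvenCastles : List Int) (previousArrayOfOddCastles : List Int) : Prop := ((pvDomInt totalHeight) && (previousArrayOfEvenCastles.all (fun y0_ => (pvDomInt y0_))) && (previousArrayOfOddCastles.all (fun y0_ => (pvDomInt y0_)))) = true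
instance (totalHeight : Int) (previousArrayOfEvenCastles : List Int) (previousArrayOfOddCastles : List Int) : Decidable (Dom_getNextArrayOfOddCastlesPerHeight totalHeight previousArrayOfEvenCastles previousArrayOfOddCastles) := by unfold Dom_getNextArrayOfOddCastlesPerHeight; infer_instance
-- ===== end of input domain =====

-- B replaces A's per-index strided slice sums by one pass with running parity-split
-- prefix sums and a running suffix sum (objective: faster, O(n^2) → O(n)).

-- ===== PORT A =====
-- list indexing is ported with pyGetD _ _ 0: exact under Pre_, which guarantees every
-- index A touches is in range (outside Pre_ the Python raises IndexError).
def getNextArrayOfOddCastlesPerHeight (totalHeight : Int) (previousArrayOfEvenCastles : List Int) (previousArrayOfOddCastles : List Int) : List Int :=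
  (PySem.List.pyRange 0 (totalHeight + 1)).foldl
    (fun oddCastlesByHeight index =>
      let oddStart : Int := if PySem.Int.mod index 2 == 0 then 1 else 0
      let partialEvenSumAlternating :=
        (PySem.List.pyRange oddStart (index - 1 + 1) 2).map
          (fun x => PySem.List.pyGetD previousArrayOfEvenCastles x 0)
      let partialOddSumAlternating :=
        (PySem.List.pyRange ((oddStart - 1) ^ 2) (index - 2 + 1) 2).map
          (fun x => PySem.List.pyGetD previousArrayOfOddCastles x 0)
      oddCastlesByHeight ++
        [partialEvenSumAlternating.sum +
          (PySem.List.slice previousArrayOfOddCastles (some index) none).sum +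
          partialOddSumAlternating.sum]) []

-- ===== PORT B =====
-- loop body of Source B; state = (result, evenPrefix, oddPrefix, suffix), the two-element
-- parity lists evenPrefix/oddPrefix of Source B are pairs (index 0 = .1, index 1 = .2)
def pvAltStep (previousArrayOfEvenCastles previousArrayOfOddCastles : List Int)
    (st : List Int × (Int × Int) × (Int × Int) × Int) (i : Int) :
    List Int × (Int × Int) × (Int × Int) × Int :=
  let result := st.1
  let evenPrefix := st.2.1
  let oddPrefix := st.2.2.1
  let suffix := st.2.2.2
  let result := result ++
    [(if PySem.Int.mod i 2 == 0 then evenPrefix.2 else evenPrefix.1) +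
     (if PySem.Int.mod i 2 == 0 then oddPrefix.1 else oddPrefix.2) + suffix]
  let evenPrefix :=
    if i < (previousArrayOfEvenCastles.length : Int) then
      (if PySem.Int.mod i 2 == 0 then
        (evenPrefix.1 + PySem.List.pyGetD previousArrayOfEvenCastles i 0, evenPrefix.2)
       else
        (evenPrefix.1, evenPrefix.2 + PySem.List.pyGetD previousArrayOfEvenCastles i 0))
    else evenPrefix
  let oddPrefix' :=
    if i < (previousArrayOfOddCastles.length : Int) then
      (if PySem.Int.mod i 2 == 0 then
        (oddPrefix.1 + PySem.List.pyGetD previousArrayOfOddCastles i 0, oddPrefix.2)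
       else
        (oddPrefix.1, oddPrefix.2 + PySem.List.pyGetD previousArrayOfOddCastles i 0))
    else oddPrefix
  let suffix :=
    if i < (previousArrayOfOddCastles.length : Int) then
      suffix - PySem.List.pyGetD previousArrayOfOddCastles i 0
    else suffix
  (result, evenPrefix, oddPrefix', suffix)

def getNextArrayOfOddCastlesPerHeight_alt (totalHeight : Int) (previousArrayOfEvenCastles : List Int) (previousArrayOfOddCastles : List Int) : List Int :=
  ((PySem.List.pyRange 0 (totalHeight + 1)).foldl
    (pvAltStep previousArrayOfEvenCastles previousArrayOfOddCastles)
    ([], (0, 0), (0, 0), previousArrayOfOddCastles.sum)).1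

-- ===== PRECONDITION & SPEC =====
-- Pre_ excludes exactly the inputs on which A raises IndexError: A reads
-- previousArrayOfEvenCastles up to index totalHeight-1 and previousArrayOfOddCastles
-- up to index totalHeight-2, so shorter lists make it raise.
def Pre_getNextArrayOfOddCastlesPerHeight (totalHeight : Int) (previousArrayOfEvenCastles : List Int) (previousArrayOfOddCastles : List Int) : Prop :=
  totalHeight ≤ (previousArrayOfEvenCastles.length : Int) ∧
  totalHeight - 1 ≤ (previousArrayOfOddCastles.length : Int)
instance (totalHeight : Int) (previousArrayOfEvenCastles : List Int) (previousArrayOfOddCastles : List Int) : Decidable (Pre_getNextArrayOfOddCastlesPerHeight totalHeight previousArrayOfEvenCastles previousArrayOfOddCastles) := by unfold Pre_getNextArrayOfOddCastlesPerHeight; infer_instance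

def pvWitness_getNextArrayOfOddCastlesPerHeight : Int × List Int × List Int := (2, [1, 2], [3])

def Spec_getNextArrayOfOddCastlesPerHeight (totalHeight : Int) (previousArrayOfEvenCastles : List Int) (previousArrayOfOddCastles : List Int) (out : List Int) : Prop := out = getNextArrayOfOddCastlesPerHeight_alt totalHeight previousArrayOfEvenCastles previousArrayOfOddCastles
instance (totalHeight : Int) (previousArrayOfEvenCastles : List Int) (previousArrayOfOddCastles : List Int) (out : List Int) : Decidable (Spec_getNextArrayOfOddCastlesPerHeight totalHeight previousArrayOfEvenCastles previousArrayOfOddCastles out) := by unfold Spec_getNextArrayOfOddCastlesPerHeight; infer_instance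

-- ===== CLAIM (what is proved, stated in full; the proofs are below) =====
def Claim_equal_getNextArrayOfOddCastlesPerHeight : Prop := ∀ (totalHeight : Int) (previousArrayOfEvenCastles : List Int) (previousArrayOfOddCastles : List Int), Dom_getNextArrayOfOddCastlesPerHeight totalHeight previousArrayOfEvenCastles previousArrayOfOddCastles → Pre_getNextArrayOfOddCastlesPerHeight totalHeight previousArrayOfEvenCastles previousArrayOfOddCastles → Spec_getNextArrayOfOddCastlesPerHeight totalHeight previousArrayOfEvenCastles previousArrayOfOddCastles (getNextArrayOfOddCastlesPerHeight totalHeight previousArrayOfEvenCastles previousArrayOfOddCastles)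

-- ===== LEMMAS AND PROOFS =====

def pvS2 (f : Nat → Int) (p : Nat) : Nat → Int
  | 0 => 0
  | i + 1 => pvS2 f p i + (if i % 2 = p then f i else 0)

def pvGE (e : List Int) (n : Nat) : Int := e.getD n 0

def pvGO (o : List Int) (n : Nat) : Int := o.getD n 0

def pvBVal (e o : List Int) (k : Nat) : Int :=
  (if k % 2 = 0 then pvS2 (pvGE e) 1 k + pvS2 (pvGO o) 0 k
   else pvS2 (pvGE e) 0 k + pvS2 (pvGO o) 1 k) + (o.drop k).sum

theorem pvMod_cast (n : Nat) : PySem.Int.mod (n : Int) 2 = ((n % 2 : Nat) : Int) := by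
  show (n:Int).fmod 2 = _
  rw [Int.fmod_eq_emod]
  omega

theorem pvRange_two_nil (a b : Int) (h : b ≤ a) : PySem.List.pyRange a b 2 = [] := by
  rw [PySem.List.pyRange_of_pos _ _ (by norm_num), if_neg (by omega)]
  simp

theorem pvS2_step_ne (f : Nat → Int) (p k : Nat) (h : k % 2 ≠ p) :
    pvS2 f p (k + 1) = pvS2 f p k := by
  simp [pvS2, h]

theorem pvS2_succ (f : Nat → Int) (p n : Nat) :
    pvS2 f p (n + 1) = pvS2 f p n + (if n % 2 = p then f n else 0) := rfl

theorem pvDropSum (o : List Int) (n : Nat) :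
    (o.drop (n + 1)).sum = (o.drop n).sum - o.getD n 0 := by
  by_cases h : n < o.length
  · conv_rhs => rw [List.drop_eq_getElem_cons h]
    rw [List.getD_eq_getElem o 0 h, List.sum_cons]
    ring
  · rw [List.drop_eq_nil_of_le (by omega : o.length ≤ n + 1),
      List.drop_eq_nil_of_le (by omega : o.length ≤ n),
      List.getD_eq_default _ _ (by omega)]
    simp

theorem pvRange_two_succ (a b : Int) (hab : a ≤ b) :
    PySem.List.pyRange a (b + 1) 2 =
      PySem.List.pyRange a b 2 ++ (if b % 2 = a % 2 then [b] else []) := by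
  rw [PySem.List.pyRange_of_pos a (b+1) (by norm_num), PySem.List.pyRange_of_pos a b (by norm_num)]
  have hlt : a < b + 1 := by omega
  rw [if_pos hlt]
  by_cases hpar : b % 2 = a % 2
  · have h1 : ((b + 1 - a + 2 - 1) / 2).toNat
        = (if a < b then ((b - a + 2 - 1) / 2).toNat else 0) + 1 := by
      split_ifs <;> omega
    rw [h1, List.range_succ, List.map_append, if_pos hpar]
    congr 1
    simp only [List.map_cons, List.map_nil, List.cons.injEq, and_true]
    split_ifs <;> push_cast <;> omega
  · have h1 : ((b + 1 - a + 2 - 1) / 2).toNat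
        = (if a < b then ((b - a + 2 - 1) / 2).toNat else 0) := by
      split_ifs <;> omega
    rw [h1, if_neg hpar, List.append_nil]

theorem pvSum_pyRange_two (g : Int → Int) (p : Nat) (hp : p < 2) (i : Nat) :
    ((PySem.List.pyRange (p : Int) (i : Int) 2).map g).sum = pvS2 (fun n => g n) p i := by
  induction i with
  | zero =>
    have h0 : PySem.List.pyRange (p : Int) 0 2 = [] := by
      rw [PySem.List.pyRange_of_pos _ _ (by norm_num)]
      rw [if_neg (by omega)]
      simp
    simp [h0, pvS2]
  | succ i ih =>
    by_cases h : (p : Int) ≤ (i : Int)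
    · rw [show ((i + 1 : Nat) : Int) = (i : Int) + 1 from by omega,
        pvRange_two_succ _ _ h, List.map_append, List.sum_append, ih]
      simp only [pvS2]
      congr 1
      by_cases hpar : i % 2 = p
      · rw [if_pos (by omega), if_pos hpar]
        simp
      · rw [if_neg (by omega), if_neg hpar]
        simp
    · -- i < p, so p = 1, i = 0
      have hp1 : p = 1 := by omega
      have hi0 : i = 0 := by omega
      subst hp1; subst hi0
      have h0 : PySem.List.pyRange (1 : Int) 1 2 = [] := by
        rw [PySem.List.pyRange_of_pos _ _ (by norm_num)]
        rw [if_neg (by omega)]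
        simp
      simp [h0, pvS2]

theorem pvA_val (e o : List Int) (k : Nat) :
    (let oddStart : Int := if PySem.Int.mod (k : Int) 2 == 0 then 1 else 0
     ((PySem.List.pyRange oddStart ((k : Int) - 1 + 1) 2).map
        (fun x => PySem.List.pyGetD e x 0)).sum +
      (PySem.List.slice o (some (k : Int)) none).sum +
      ((PySem.List.pyRange ((oddStart - 1) ^ 2) ((k : Int) - 2 + 1) 2).map
        (fun x => PySem.List.pyGetD o x 0)).sum) = pvBVal e o k := by
  have hge : (fun n : Nat => PySem.List.pyGetD e (n : Int) 0) = pvGE e := by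
    funext n; simp [pvGE]
  have hgo : (fun n : Nat => PySem.List.pyGetD o (n : Int) 0) = pvGO o := by
    funext n; simp [pvGO]
  have hslice : (PySem.List.slice o (some (k : Int)) none).sum = (o.drop k).sum := by
    rw [PySem.List.slice_from o (by positivity)]
    simp
  have hkk : (k : Int) - 1 + 1 = (k : Int) := by ring
  by_cases hk : k % 2 = 0
  · have hmod : (PySem.Int.mod (k : Int) 2 == 0) = true := by
      rw [pvMod_cast, hk]; simp
    simp only [hmod, if_pos, hkk]
    rcases Nat.eq_zero_or_pos k with hk0 | hkpos
    · subst hk0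
      norm_num [pvBVal, pvS2, hslice, pvRange_two_nil 1 0 (by norm_num),
        pvRange_two_nil 0 (-1) (by norm_num)]
    · -- even part
      have he : ((PySem.List.pyRange (1 : Int) (k : Int) 2).map
          (fun x => PySem.List.pyGetD e x 0)).sum = pvS2 (pvGE e) 1 k := by
        have := pvSum_pyRange_two (fun x => PySem.List.pyGetD e x 0) 1 (by omega) k
        rw [show ((1:Nat):Int) = (1:Int) by norm_num] at this
        rw [this, hge]
      have hk1 : (k : Int) - 2 + 1 = ((k - 1 : Nat) : Int) := by omega
      have hosum : (((PySem.List.pyRange ((1 - 1 : Int) ^ 2) ((k : Int) - 2 + 1) 2).map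
          (fun x => PySem.List.pyGetD o x 0)).sum) = pvS2 (pvGO o) 0 k := by
        rw [hk1]
        have h0 : ((1:Int) - 1) ^ 2 = ((0 : Nat) : Int) := by norm_num
        rw [h0]
        rw [pvSum_pyRange_two (fun x => PySem.List.pyGetD o x 0) 0 (by omega) (k-1), hgo]
        have hstep : pvS2 (pvGO o) 0 (k - 1 + 1) = pvS2 (pvGO o) 0 (k - 1) :=
          pvS2_step_ne _ _ _ (by omega)
        rw [show k - 1 + 1 = k from by omega] at hstep
        exact hstep.symm
      rw [he, hosum, hslice, pvBVal, if_pos hk]; ring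
  · have hmod : (PySem.Int.mod (k : Int) 2 == 0) = false := by
      rw [pvMod_cast]
      simp
      omega
    simp only [hmod, Bool.false_eq_true, if_false, hkk]
    have he : ((PySem.List.pyRange (0 : Int) (k : Int) 2).map
        (fun x => PySem.List.pyGetD e x 0)).sum = pvS2 (pvGE e) 0 k := by
      have := pvSum_pyRange_two (fun x => PySem.List.pyGetD e x 0) 0 (by omega) k
      rw [show ((0:Nat):Int) = (0:Int) by norm_num] at this
      rw [this, hge]
    have hk1 : (k : Int) - 2 + 1 = ((k - 1 : Nat) : Int) := by omega
    have hosum : (((PySem.List.pyRange ((0 - 1 : Int) ^ 2) ((k : Int) - 2 + 1) 2).map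
        (fun x => PySem.List.pyGetD o x 0)).sum) = pvS2 (pvGO o) 1 k := by
      rw [hk1]
      have h0 : ((0:Int) - 1) ^ 2 = ((1 : Nat) : Int) := by norm_num
      rw [h0]
      rw [pvSum_pyRange_two (fun x => PySem.List.pyGetD o x 0) 1 (by omega) (k-1), hgo]
      have hstep : pvS2 (pvGO o) 1 (k - 1 + 1) = pvS2 (pvGO o) 1 (k - 1) :=
        pvS2_step_ne _ _ _ (by omega)
      rw [show k - 1 + 1 = k from by omega] at hstep
      exact hstep.symm
    rw [he, hosum, hslice, pvBVal, if_neg hk]; ring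

theorem pvAlt_fold (e o : List Int) (n : Nat) :
    (PySem.List.pyRange 0 (n : Int)).foldl (pvAltStep e o) ([], (0, 0), (0, 0), o.sum)
      = ((List.range n).map (pvBVal e o),
         (pvS2 (pvGE e) 0 n, pvS2 (pvGE e) 1 n),
         (pvS2 (pvGO o) 0 n, pvS2 (pvGO o) 1 n),
         (o.drop n).sum) := by
  induction n with
  | zero =>
    rw [show ((0:Nat):Int) = 0 by norm_num, PySem.List.pyRange_one_eq_nil le_rfl]
    simp [pvS2]
  | succ n ih =>
    have hcast : ((n + 1 : Nat) : Int) = (n : Int) + 1 := by omega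
    rw [hcast, PySem.List.pyRange_one_succ_right (by positivity), List.foldl_append, ih]
    simp only [List.foldl_cons, List.foldl_nil]
    rw [pvAltStep]
    simp only [pvMod_cast n]
    have hlen_e : ((n : Int) < (e.length : Int)) ↔ n < e.length := by exact_mod_cast Iff.rfl
    have hlen_o : ((n : Int) < (o.length : Int)) ↔ n < o.length := by exact_mod_cast Iff.rfl
    have hDe : ¬ n < e.length → e.getD n 0 = 0 :=
      fun h => List.getD_eq_default _ _ (by omega)
    have hDo : ¬ n < o.length → o.getD n 0 = 0 :=
      fun h => List.getD_eq_default _ _ (by omega)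
    by_cases hpar : n % 2 = 0
    · simp only [hpar, Nat.cast_zero, if_true, beq_self_eq_true]
      refine Prod.ext ?_ (Prod.ext (Prod.ext ?_ ?_) (Prod.ext (Prod.ext ?_ ?_) ?_))
      · simp [List.range_succ, pvBVal, hpar]
      · by_cases he : n < e.length
        · simp [hlen_e, he, pvS2_succ, hpar, pvGE]
        · simp [hlen_e, he, pvS2_succ, hpar, pvGE]
      · by_cases he : n < e.length
        · simp [hlen_e, he, pvS2_succ, hpar]
        · simp [hlen_e, he, pvS2_succ, hpar]
      · by_cases ho : n < o.length
        · simp [hlen_o, ho, pvS2_succ, hpar, pvGO]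
        · simp [hlen_o, ho, pvS2_succ, hpar, pvGO]
      · by_cases ho : n < o.length
        · simp [hlen_o, ho, pvS2_succ, hpar]
        · simp [hlen_o, ho, pvS2_succ, hpar]
      · by_cases ho : n < o.length
        · simp only [hlen_o, ho, if_true, PySem.List.pyGetD_natCast]
          rw [pvDropSum]
        · simp only [hlen_o, ho, if_false]
          rw [pvDropSum, hDo ho]
          ring
    · have hpar1 : n % 2 = 1 := by omega
      simp only [hpar1, Nat.cast_one, show ((1:Int) == 0) = false by decide, if_false,
        Bool.false_eq_true]
      refine Prod.ext ?_ (Prod.ext (Prod.ext ?_ ?_) (Prod.ext (Prod.ext ?_ ?_) ?_))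
      · simp [List.range_succ, pvBVal, hpar]
      · by_cases he : n < e.length
        · simp [hlen_e, he, pvS2_succ, hpar1]
        · simp [hlen_e, he, pvS2_succ, hpar1]
      · by_cases he : n < e.length
        · simp [hlen_e, he, pvS2_succ, hpar1, pvGE]
        · simp [hlen_e, he, pvS2_succ, hpar1, pvGE]
      · by_cases ho : n < o.length
        · simp [hlen_o, ho, pvS2_succ, hpar1]
        · simp [hlen_o, ho, pvS2_succ, hpar1]
      · by_cases ho : n < o.length
        · simp [hlen_o, ho, pvS2_succ, hpar1, pvGO]
        · simp [hlen_o, ho, pvS2_succ, hpar1, pvGO]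
      · by_cases ho : n < o.length
        · simp only [hlen_o, ho, if_true, PySem.List.pyGetD_natCast]
          rw [pvDropSum]
        · simp only [hlen_o, ho, if_false]
          rw [pvDropSum, hDo ho]
          ring

-- ===== VERDICT (by name: the statement is the Claim_ definition above) =====
theorem getNextArrayOfOddCastlesPerHeight_spec : Claim_equal_getNextArrayOfOddCastlesPerHeight := by
  intro th e o _hDom _hPre
  unfold Spec_getNextArrayOfOddCastlesPerHeight
  unfold getNextArrayOfOddCastlesPerHeight getNextArrayOfOddCastlesPerHeight_alt
  by_cases h : th + 1 ≤ 0
  · rw [PySem.List.pyRange_one_eq_nil h]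
    simp
  · obtain ⟨n, hn⟩ : ∃ n : Nat, th + 1 = (n : Int) := ⟨(th + 1).toNat, by omega⟩
    rw [hn, pvAlt_fold, PySem.List.foldl_append_singleton_eq_map,
        PySem.List.pyRange_zero_natCast, List.map_map, List.nil_append]
    refine List.map_congr_left ?_
    intro k _hk
    simpa using pvA_val e o k
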